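-- pv_equiv track=rewrite | github.com/doakey3/Subsimport | operators/pysrt/convert_enhanced.py | empty_text
-- ===== SOURCE A (Python) =====
-- def empty_text(text):
--     """
--     Creates a string from text where each character (except newline)
--     is a space
--     """
--     lines = text.split('\n')
--     empty_text = ''
--     for x in range(len(lines)):
--         for char in range(len(lines[x])):
--             empty_text += ' '
--         empty_text += '\n'
--
--     return empty_text[0:-1]
-- ===== SOURCE B (Python) =====
-- def empty_text(text):
--     """
--     Creates a string from text where each character (except newline)
--     is a space
--     """
--     return ''.join('\n' if c == '\n' else ' ' for c in text)
-- ===== Notes on version B (the rewrite author's own statement) =====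
-- stated objective: simpler
-- what changed: Replaces A's split-into-lines, nested counting loops and append-sentinel-then-trim reconstruction with one direct position-preserving character map over the string.
import Mathlib
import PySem

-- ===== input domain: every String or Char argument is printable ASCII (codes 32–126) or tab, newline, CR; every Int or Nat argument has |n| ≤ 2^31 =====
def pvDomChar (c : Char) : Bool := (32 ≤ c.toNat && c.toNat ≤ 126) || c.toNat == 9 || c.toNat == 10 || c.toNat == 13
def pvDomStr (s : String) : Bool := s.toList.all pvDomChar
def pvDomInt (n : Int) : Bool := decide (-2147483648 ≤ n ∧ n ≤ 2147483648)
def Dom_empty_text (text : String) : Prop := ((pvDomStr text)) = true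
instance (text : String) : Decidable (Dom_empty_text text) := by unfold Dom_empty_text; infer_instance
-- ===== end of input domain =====

-- B replaces A's split-into-lines / nested loops / trailing-'\n'-then-trim reconstruction
-- with a single position-preserving character map (objective: simpler).

-- ===== PORT A =====
-- lines = text.split('\n'); nested loops appending ' ' per character and '\n' per line; return empty_text[0:-1]
def empty_text (text : String) : String :=
  let lines : List (List Char) := PySem.Chars.splitOn text.toList ['\n']
  let emptyAcc : List Char :=
    (PySem.List.pyRange 0 (PySem.List.len lines)).foldl
      (fun acc x =>
        let line := PySem.List.pyGetD lines x []
        ((PySem.List.pyRange 0 (PySem.List.len line)).foldl (fun a _ => a ++ [' ']) acc) ++ ['\n'])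
      []
  String.ofList (PySem.List.slice emptyAcc (some 0) (some (-1)))

-- ===== PORT B =====
-- ''.join('\n' if c == '\n' else ' ' for c in text)
def empty_text_alt (text : String) : String :=
  String.ofList (text.toList.map (fun c => if c = '\n' then '\n' else ' '))

-- ===== PRECONDITION & SPEC =====
def Spec_empty_text (text : String) (out : String) : Prop := out = empty_text_alt text
instance (text : String) (out : String) : Decidable (Spec_empty_text text out) := by unfold Spec_empty_text; infer_instance

-- ===== CLAIM (what is proved, stated in full; the proofs are below) =====
def Claim_equal_empty_text : Prop := ∀ (text : String), Dom_empty_text text → Spec_empty_text text (empty_text text)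

-- ===== LEMMAS AND PROOFS =====

-- simple reference split on '\n'
def splitNL : List Char → List (List Char)
  | [] => [[]]
  | c :: rest => if c = '\n' then [] :: splitNL rest else (splitNL rest).modifyHead (c :: ·)

theorem splitNL_ne_nil (l : List Char) : splitNL l ≠ [] := by
  induction l with
  | nil => simp [splitNL]
  | cons c rest ih =>
    simp only [splitNL]
    split_ifs
    · simp
    · cases h : splitNL rest with
      | nil => exact absurd h ih
      | cons a t => simp [List.modifyHead]

theorem go_eq_splitNL (l : List Char) : ∀ (fuel : Nat), l.length < fuel →
    ∀ (cur : List Char) (acc : List (List Char)),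
    PySem.Chars.splitOn.go ['\n'] fuel l cur acc
      = acc.reverse ++ (splitNL l).modifyHead (cur.reverse ++ ·) := by
  induction l with
  | nil =>
    intro fuel hf cur acc
    match fuel, hf with
    | fuel + 1, _ =>
      simp [PySem.Chars.splitOn.go, splitNL, List.modifyHead]
  | cons c rest ih =>
    intro fuel hf cur acc
    match fuel, hf with
    | fuel + 1, hf =>
      have hlt : rest.length < fuel := by simpa using Nat.lt_of_succ_lt_succ hf
      by_cases hc : c = '\n'
      · subst hc
        have hpre : List.isPrefixOf ['\n'] ('\n' :: rest) = true := by
          simp [List.isPrefixOf]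
        simp only [PySem.Chars.splitOn.go, hpre, if_true, List.length_cons, List.length_nil,
          List.drop_succ_cons, List.drop_zero]
        rw [ih fuel hlt [] (cur.reverse :: acc)]
        cases hs : splitNL rest <;> simp [splitNL, List.modifyHead, hs]
      · have hpre : List.isPrefixOf ['\n'] (c :: rest) = false := by
          simp [List.isPrefixOf]
          exact fun h => hc h.symm
        simp only [PySem.Chars.splitOn.go, hpre, Bool.false_eq_true, if_false]
        rw [ih fuel hlt (c :: cur) acc]
        simp only [splitNL, if_neg hc]
        obtain ⟨h, t, hht⟩ : ∃ h t, splitNL rest = h :: t := by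
          cases hs : splitNL rest with
          | nil => exact absurd hs (splitNL_ne_nil rest)
          | cons h t => exact ⟨h, t, rfl⟩
        simp [hht, List.modifyHead]

theorem splitOn_eq_splitNL (l : List Char) : PySem.Chars.splitOn l ['\n'] = splitNL l := by
  show PySem.Chars.splitOn.go ['\n'] (l.length + 1) l [] [] = _
  rw [go_eq_splitNL l (l.length + 1) (Nat.lt_succ_self _) [] []]
  cases h : splitNL l with
  | nil => exact absurd h (splitNL_ne_nil l)
  | cons a t => simp [List.modifyHead]

-- inner loop: appending ' ' once per range element
theorem foldl_spaces (n : Nat) (acc : List Char) :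
    (PySem.List.pyRange 0 (n : Int)).foldl (fun a _ => a ++ [' ']) acc
      = acc ++ List.replicate n ' ' := by
  have hlen : (PySem.List.pyRange 0 (n : Int)).length = n := by
    simp [PySem.List.length_pyRange_one]
  generalize hxs : PySem.List.pyRange 0 (n : Int) = xs at hlen
  subst hlen
  clear hxs
  induction xs generalizing acc with
  | nil => simp
  | cons x xs ih =>
    rw [List.foldl_cons, ih]
    simp [List.replicate_succ]

-- the fold over splitNL pieces reconstructs the character map plus a trailing '\n'
theorem foldl_splitNL (s : List Char) : ∀ (acc : List Char),
    (splitNL s).foldl (fun a line => a ++ List.replicate line.length ' ' ++ ['\n']) acc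
      = acc ++ s.map (fun c => if c = '\n' then '\n' else ' ') ++ ['\n'] := by
  induction s with
  | nil => intro acc; simp [splitNL]
  | cons c rest ih =>
    intro acc
    by_cases hc : c = '\n'
    · subst hc
      simp only [splitNL, if_true, List.foldl_cons, List.replicate, List.length_nil]
      rw [ih]
      simp
    · simp only [splitNL, if_neg hc]
      obtain ⟨h, t, hht⟩ : ∃ h t, splitNL rest = h :: t := by
        cases hs : splitNL rest with
        | nil => exact absurd hs (splitNL_ne_nil rest)
        | cons h t => exact ⟨h, t, rfl⟩
      rw [hht]
      have := ih (acc ++ [' '])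
      rw [hht] at this
      simp only [List.modifyHead, List.foldl_cons] at this ⊢
      rw [show (acc ++ List.replicate (c :: h).length ' ' ++ ['\n'])
            = (acc ++ [' '] ++ List.replicate h.length ' ' ++ ['\n']) by
        simp [List.replicate_succ, List.append_assoc]]
      rw [this]
      simp [hc, List.append_assoc]

-- ===== VERDICT (by name: the statement is the Claim_ definition above) =====
theorem empty_text_spec : Claim_equal_empty_text := by
  intro text _
  unfold Spec_empty_text empty_text empty_text_alt
  simp only [splitOn_eq_splitNL]
  have houter :
      (PySem.List.pyRange 0 (PySem.List.len (splitNL text.toList))).foldl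
        (fun acc x =>
          ((PySem.List.pyRange 0 (PySem.List.len (PySem.List.pyGetD (splitNL text.toList) x []))).foldl
            (fun a _ => a ++ [' ']) acc) ++ ['\n']) ([] : List Char)
        = (splitNL text.toList).foldl
            (fun a line => a ++ List.replicate line.length ' ' ++ ['\n']) [] := by
    have := PySem.List.foldl_pyRange_pyGetD (splitNL text.toList) ([] : List Char)
      (fun (acc : List Char) (line : List Char) =>
        ((PySem.List.pyRange 0 (PySem.List.len line)).foldl (fun a _ => a ++ [' ']) acc) ++ ['\n'])
      ([] : List Char) (a := 0) le_rfl
    simp only [Int.toNat_zero, List.drop_zero] at this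
    rw [this]
    apply PySem.List.foldl_congr_mem
    intro a line _
    rw [show PySem.List.len line = ((line.length : Nat) : Int) from rfl, foldl_spaces]
  rw [houter, foldl_splitNL]
  simp only [List.nil_append]
  rw [PySem.List.slice_zero_start, PySem.List.slice_to_neg_one]
  simp
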